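-- pv_equiv track=rewrite | github.com/837477/Algorithm | Programmers/월간 코드 챌린지 시즌1/삼각 달패이.py | solution
-- ===== SOURCE A (Python) =====
-- def solution(n):
--     result = [[0 for j in range(i)] for i in range(1, n+1)]
--     location = [-1, 0]
--     p = "down"
--
--     num = 1
--     for i in range(n):
--         if p == "down":
--             for j in range(i, n):
--                 location[0] += 1
--                 result[location[0]][location[1]] = num
--                 num += 1
--             p = "right"
--
--         elif p == "right":
--             for j in range(i, n):
--                 location[1] += 1
--                 result[location[0]][location[1]] = num
--                 num += 1
--             p = "up"
--
--         else:
--             for j in range(i, n):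
--                 location[0] -= 1
--                 location[1] -= 1
--                 result[location[0]][location[1]] = num
--                 num += 1
--             p = "down"
--
--     answer = []
--     for i in result:
--         for j in i:
--             answer.append(j)
--
--     return answer
-- ===== SOURCE B (Python) =====
-- def solution(n):
--     grid = [[0] * i for i in range(1, n + 1)]
--     deltas = [(1, 0), (0, 1), (-1, -1)]
--     r, c, d = -1, 0, 0
--     leg = n      # length of the current leg
--     steps = n    # cells still to fill on the current leg
--     num = 1
--     total = n * (n + 1) // 2 if n > 0 else 0
--     for _ in range(total):
--         dr, dc = deltas[d]
--         r += dr
--         c += dc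
--         grid[r][c] = num
--         num += 1
--         steps -= 1
--         if steps == 0:
--             d = (d + 1) % 3
--             leg -= 1
--             steps = leg
--     return [v for row in grid for v in row]
-- ===== Notes on version B (the rewrite author's own statement) =====
-- stated objective: simpler
-- what changed: Replaces A's outer phase loop with three direction-specific inner loops and a direction string by a single flat loop over all n(n+1)/2 cells driven by a delta table and a leg-length countdown.
import Mathlib
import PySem

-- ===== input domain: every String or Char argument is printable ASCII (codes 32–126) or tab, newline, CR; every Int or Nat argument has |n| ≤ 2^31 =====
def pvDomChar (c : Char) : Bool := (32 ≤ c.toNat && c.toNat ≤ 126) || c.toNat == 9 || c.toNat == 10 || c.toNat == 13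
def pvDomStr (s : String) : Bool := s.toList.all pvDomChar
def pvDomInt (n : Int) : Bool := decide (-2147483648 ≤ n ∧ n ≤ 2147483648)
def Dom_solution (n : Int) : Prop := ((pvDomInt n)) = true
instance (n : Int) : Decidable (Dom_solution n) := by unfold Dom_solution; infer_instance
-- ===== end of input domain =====

-- B replaces A's outer phase loop + three direction-specific inner loops by ONE flat loop over
-- all n(n+1)/2 cells with a direction table and a leg-length countdown (objective: simpler decomposition).

-- shared helper: Python's `grid[r][c] = v` on a jagged list-of-lists (negative indices wrap as in
-- Python; an out-of-range write — where Python would raise, which neither program ever reaches on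
-- any int input — leaves the grid unchanged)
def pySetCell (g : List (List Int)) (r c v : Int) : List (List Int) :=
  let r' := if r < 0 then r + g.length else r
  if r' < 0 then g else
  g.modify r'.toNat (fun row =>
    let c' := if c < 0 then c + row.length else c
    if c' < 0 then row else row.set c'.toNat v)

-- A's loop state: (result, location[0], location[1], p, num)
abbrev AEnv : Type := List (List Int) × Int × Int × String × Int
-- the inner-loop state (without p)
abbrev ACell : Type := List (List Int) × Int × Int × Int

-- ===== PORT A =====
-- body of A's outer `for i in range(n)` loop
def aPhase (n : Int) (s : AEnv) (i : Int) : AEnv :=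
  if s.2.2.2.1 = "down" then
    let t := (PySem.List.pyRange i n 1).foldl
      (fun (t : ACell) _ => (pySetCell t.1 (t.2.1+1) t.2.2.1 t.2.2.2, t.2.1+1, t.2.2.1, t.2.2.2+1))
      (s.1, s.2.1, s.2.2.1, s.2.2.2.2)
    (t.1, t.2.1, t.2.2.1, "right", t.2.2.2)
  else if s.2.2.2.1 = "right" then
    let t := (PySem.List.pyRange i n 1).foldl
      (fun (t : ACell) _ => (pySetCell t.1 t.2.1 (t.2.2.1+1) t.2.2.2, t.2.1, t.2.2.1+1, t.2.2.2+1))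
      (s.1, s.2.1, s.2.2.1, s.2.2.2.2)
    (t.1, t.2.1, t.2.2.1, "up", t.2.2.2)
  else
    let t := (PySem.List.pyRange i n 1).foldl
      (fun (t : ACell) _ => (pySetCell t.1 (t.2.1-1) (t.2.2.1-1) t.2.2.2, t.2.1-1, t.2.2.1-1, t.2.2.2+1))
      (s.1, s.2.1, s.2.2.1, s.2.2.2.2)
    (t.1, t.2.1, t.2.2.1, "down", t.2.2.2)

def solution (n : Int) : List Int :=
  let result := (PySem.List.pyRange 1 (n+1) 1).map (fun i => (PySem.List.pyRange 0 i 1).map (fun _ => (0:Int)))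
  let st := (PySem.List.pyRange 0 n 1).foldl (aPhase n) (result, (-1 : Int), (0 : Int), "down", (1 : Int))
  st.1.foldl (fun acc row => row.foldl (fun acc v => acc ++ [v]) acc) []

-- ===== PORT B =====
-- B's loop state: (grid, r, c, d, leg, steps, num)
abbrev BEnv : Type := List (List Int) × Int × Int × Int × Int × Int × Int

-- one iteration of B's flat loop body
def bStep (s : BEnv) : BEnv :=
  match s with
  | (g, r, c, d, leg, steps, num) =>
    let delta := (PySem.List.pyGet? [((1:Int),(0:Int)), (0,1), (-1,-1)] d).getD (0,0)
    let r' := r + delta.1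
    let c' := c + delta.2
    let g' := pySetCell g r' c' num
    let steps' := steps - 1
    if steps' = 0 then (g', r', c', PySem.Int.mod (d+1) 3, leg - 1, leg - 1, num + 1)
    else (g', r', c', d, leg, steps', num + 1)

-- `for _ in range(total)` : run the body `total` times
def bRun : Nat → BEnv → BEnv
  | 0, s => s
  | k+1, s => bRun k (bStep s)

def solution_alt (n : Int) : List Int :=
  let grid := (PySem.List.pyRange 1 (n+1) 1).map (fun i => List.replicate i.toNat (0:Int))
  let total := if 0 < n then PySem.Int.floordiv (n*(n+1)) 2 else 0
  let st := bRun total.toNat (grid, -1, 0, 0, n, n, 1)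
  st.1.flatMap (fun row => row)

-- ===== PRECONDITION & SPEC =====
def Spec_solution (n : Int) (out : List Int) : Prop := out = solution_alt n
instance (n : Int) (out : List Int) : Decidable (Spec_solution n out) := by unfold Spec_solution; infer_instance

-- ===== CLAIM (what is proved, stated in full; the proofs are below) =====
def Claim_equal_solution : Prop := ∀ (n : Int), Dom_solution n → Spec_solution n (solution n)

-- ===== LEMMAS AND PROOFS =====

-- one cell-write in each direction (down, right, up-left diagonal)
def mvDown (t : ACell) : ACell := (pySetCell t.1 (t.2.1+1) t.2.2.1 t.2.2.2, t.2.1+1, t.2.2.1, t.2.2.2+1)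
def mvRight (t : ACell) : ACell := (pySetCell t.1 t.2.1 (t.2.2.1+1) t.2.2.2, t.2.1, t.2.2.1+1, t.2.2.2+1)
def mvUp (t : ACell) : ACell := (pySetCell t.1 (t.2.1-1) (t.2.2.1-1) t.2.2.2, t.2.1-1, t.2.2.1-1, t.2.2.2+1)

def mv (d : Fin 3) : ACell → ACell :=
  if d.val = 0 then mvDown else if d.val = 1 then mvRight else mvUp

def pstr : Fin 3 → String := fun d =>
  if d.val = 0 then "down" else if d.val = 1 then "right" else "up"

-- the common abstract walk: m remaining legs, the first of length m, in direction d
def phases : Nat → Fin 3 → ACell → ACell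
  | 0, _, s => s
  | m+1, d, s => phases m (d+1) ((mv d)^[m+1] s)

def Tnat : Nat → Nat
  | 0 => 0
  | m+1 => (m+1) + Tnat m

def emb (t : ACell) (dv leg steps : Int) : BEnv := (t.1, t.2.1, t.2.2.1, dv, leg, steps, t.2.2.2)
def embA (t : ACell) (p : String) : AEnv := (t.1, t.2.1, t.2.2.1, p, t.2.2.2)

theorem foldl_const {α β : Type} (f : β → β) (l : List α) (s : β) :
    l.foldl (fun t _ => f t) s = f^[l.length] s := by
  induction l generalizing s with
  | nil => rfl
  | cons x xs ih => simp [List.foldl_cons, ih, Function.iterate_succ_apply]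

theorem bRun_add (a b : Nat) (s : BEnv) : bRun (a + b) s = bRun b (bRun a s) := by
  induction a generalizing s with
  | zero => rw [Nat.zero_add]; rfl
  | succ a ih => rw [Nat.succ_add]; simp only [bRun]; exact ih _

theorem bStep_mid (d : Fin 3) (t : ACell) (leg steps : Int) (hs : steps - 1 ≠ 0) :
    bStep (emb t (d.val : Int) leg steps) = emb (mv d t) (d.val : Int) leg (steps - 1) := by
  fin_cases d <;>
    simp [emb, bStep, mv, mvDown, mvRight, mvUp, PySem.List.pyGet?, PySem.List.pyIdx?,
      sub_eq_add_neg] <;> omega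

theorem bStep_last (d : Fin 3) (t : ACell) (leg : Int) :
    bStep (emb t (d.val : Int) leg 1) = emb (mv d t) (((d+1 : Fin 3)).val : Int) (leg - 1) (leg - 1) := by
  fin_cases d <;>
    simp [emb, bStep, mv, mvDown, mvRight, mvUp, PySem.List.pyGet?, PySem.List.pyIdx?,
      PySem.Int.mod, sub_eq_add_neg]

theorem bRun_leg (k : Nat) (hk : 1 ≤ k) (d : Fin 3) (t : ACell) (leg : Int) :
    bRun k (emb t (d.val : Int) leg (k : Int)) =
      emb ((mv d)^[k] t) (((d+1 : Fin 3)).val : Int) (leg - 1) (leg - 1) := by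
  induction k generalizing t with
  | zero => omega
  | succ k ih =>
    by_cases hk1 : k = 0
    · subst hk1
      have h := bStep_last d t leg
      simp only [bRun]
      exact h
    · have hk' : 1 ≤ k := by omega
      have h1 : (((k+1 : Nat)) : Int) - 1 ≠ 0 := by push_cast; omega
      show bRun k (bStep _) = _
      rw [bStep_mid d t leg _ h1]
      rw [show (((k+1 : Nat)) : Int) - 1 = (k : Int) by push_cast; ring]
      rw [ih hk' (mv d t)]
      rw [Function.iterate_succ_apply]

theorem bRun_phases (m : Nat) (d : Fin 3) (t : ACell) :
    ∃ dv l s, bRun (Tnat m) (emb t (d.val : Int) (m : Int) (m : Int)) =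
      emb (phases m d t) dv l s := by
  induction m generalizing d t with
  | zero => exact ⟨(d.val : Int), 0, 0, rfl⟩
  | succ m ih =>
    rw [show Tnat (m+1) = (m+1) + Tnat m from rfl, bRun_add]
    rw [bRun_leg (m+1) (by omega) d t]
    rw [show (((m+1 : Nat)) : Int) - 1 = (m : Int) by push_cast; ring]
    obtain ⟨dv, l, s, h⟩ := ih (d+1) ((mv d)^[m+1] t)
    exact ⟨dv, l, s, by rw [h]; rfl⟩

theorem A_fold (n : Int) (m : Nat) : ∀ (i : Int), i + m = n → ∀ (d : Fin 3) (t : ACell),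
    ∃ p', (PySem.List.pyRange i n 1).foldl (aPhase n) (embA t (pstr d)) =
      embA (phases m d t) p' := by
  induction m with
  | zero =>
    intro i hi d t
    rw [PySem.List.pyRange_one_eq_nil (by omega)]
    exact ⟨pstr d, rfl⟩
  | succ m ih =>
    intro i hi d t
    rw [PySem.List.pyRange_one_cons (by omega)]
    rw [List.foldl_cons]
    have hlen : (PySem.List.pyRange i n 1).length = m + 1 := by
      rw [PySem.List.length_pyRange_one]; omega
    have hstep : aPhase n (embA t (pstr d)) i = embA ((mv d)^[m+1] t) (pstr (d+1)) := by
      obtain ⟨dv, hdv⟩ := d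
      interval_cases dv
      · rw [show pstr ⟨0, hdv⟩ = "down" from rfl, show pstr (⟨0, hdv⟩ + 1) = "right" from rfl,
          show mv ⟨0, hdv⟩ = mvDown from rfl]
        simp only [aPhase, embA]
        simp only [if_true]
        rw [foldl_const (f := fun (t : ACell) => (pySetCell t.1 (t.2.1+1) t.2.2.1 t.2.2.2, t.2.1+1, t.2.2.1, t.2.2.2+1)), hlen]
        rw [show (fun (t : ACell) => (pySetCell t.1 (t.2.1+1) t.2.2.1 t.2.2.2, t.2.1+1, t.2.2.1, t.2.2.2+1)) = mvDown from rfl]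
      · rw [show pstr ⟨1, hdv⟩ = "right" from rfl, show pstr (⟨1, hdv⟩ + 1) = "up" from rfl,
          show mv ⟨1, hdv⟩ = mvRight from rfl]
        simp only [aPhase, embA]
        rw [if_neg (show ¬ ("right" = "down") by decide)]
        rw [foldl_const (f := fun (t : ACell) => (pySetCell t.1 t.2.1 (t.2.2.1+1) t.2.2.2, t.2.1, t.2.2.1+1, t.2.2.2+1)), hlen]
        rw [show (fun (t : ACell) => (pySetCell t.1 t.2.1 (t.2.2.1+1) t.2.2.2, t.2.1, t.2.2.1+1, t.2.2.2+1)) = mvRight from rfl]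
        simp
      · rw [show pstr ⟨2, hdv⟩ = "up" from rfl, show pstr (⟨2, hdv⟩ + 1) = "down" from rfl,
          show mv ⟨2, hdv⟩ = mvUp from rfl]
        simp only [aPhase, embA]
        rw [if_neg (show ¬ ("up" = "down") by decide)]
        rw [foldl_const (f := fun (t : ACell) => (pySetCell t.1 (t.2.1-1) (t.2.2.1-1) t.2.2.2, t.2.1-1, t.2.2.1-1, t.2.2.2+1)), hlen]
        rw [show (fun (t : ACell) => (pySetCell t.1 (t.2.1-1) (t.2.2.1-1) t.2.2.2, t.2.1-1, t.2.2.1-1, t.2.2.2+1)) = mvUp from rfl]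
        simp
    rw [hstep]
    obtain ⟨p', h⟩ := ih (i+1) (by omega) (d+1) ((mv d)^[m+1] t)
    exact ⟨p', by rw [h]; rfl⟩

theorem two_Tnat (m : Nat) : 2 * Tnat m = m * (m+1) := by
  induction m with
  | zero => rfl
  | succ m ih => simp [Tnat, Nat.mul_add, ih]; ring

theorem flat_foldl (rows : List (List Int)) (acc : List Int) :
    rows.foldl (fun acc row => row.foldl (fun acc v => acc ++ [v]) acc) acc =
      acc ++ rows.flatMap (fun row => row) := by
  have hfun : (fun (acc row : List Int) => row.foldl (fun a v => a ++ [v]) acc) =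
      (fun acc row => acc ++ row) := by
    funext a r
    exact PySem.List.foldl_append_singleton_eq_self r a
  rw [hfun]
  induction rows generalizing acc with
  | nil => simp
  | cons r rs ih =>
    simp only [List.foldl_cons, List.flatMap_cons]
    rw [ih]
    simp

theorem init_eq (n : Int) :
    (PySem.List.pyRange 1 (n+1) 1).map (fun i => (PySem.List.pyRange 0 i 1).map (fun _ => (0:Int))) =
      (PySem.List.pyRange 1 (n+1) 1).map (fun i => List.replicate i.toNat (0:Int)) := by
  apply List.map_congr_left
  intro i hi
  have h0 : 0 ≤ i := by
    have := (PySem.List.mem_pyRange_one.mp hi).1; omega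
  rw [List.map_const']
  rw [PySem.List.length_pyRange_one]
  congr 1
  omega

theorem total_eq (n : Int) (hn : 0 ≤ n) :
    (if 0 < n then PySem.Int.floordiv (n*(n+1)) 2 else 0).toNat = Tnat n.toNat := by
  by_cases h0 : 0 < n
  · rw [if_pos h0]
    have hn' : ((n.toNat : Nat) : Int) = n := Int.toNat_of_nonneg hn
    have h2 : n*(n+1) = ((2 * Tnat n.toNat : Nat) : Int) := by
      rw [two_Tnat]; push_cast [hn']; ring
    rw [h2, PySem.Int.floordiv_eq_ediv_of_pos (by norm_num)]
    push_cast
    rw [Int.mul_ediv_cancel_left _ (by norm_num : (2:Int) ≠ 0)]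
    exact Int.toNat_natCast _
  · have hz : n = 0 := by omega
    simp [hz, Tnat]

-- ===== VERDICT =====
theorem solution_spec : Claim_equal_solution := by
  intro n _
  unfold Spec_solution
  simp only [solution, solution_alt]
  by_cases hn : 0 ≤ n
  · rw [init_eq n, flat_foldl, total_eq n hn]
    have hn' : ((n.toNat : Nat) : Int) = n := Int.toNat_of_nonneg hn
    have e1 : ((( PySem.List.pyRange 1 (n+1) 1).map (fun i => List.replicate i.toNat (0:Int)),
        (-1 : Int), (0 : Int), "down", (1 : Int)) : AEnv) =
        embA ((PySem.List.pyRange 1 (n+1) 1).map (fun i => List.replicate i.toNat (0:Int)), -1, 0, 1) (pstr 0) := rfl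
    have e2 : ((( PySem.List.pyRange 1 (n+1) 1).map (fun i => List.replicate i.toNat (0:Int)),
        (-1 : Int), (0 : Int), (0 : Int), n, n, (1 : Int)) : BEnv) =
        emb ((PySem.List.pyRange 1 (n+1) 1).map (fun i => List.replicate i.toNat (0:Int)), -1, 0, 1)
          (((0 : Fin 3)).val : Int) ((n.toNat : Nat) : Int) ((n.toNat : Nat) : Int) := by
      rw [hn']; rfl
    rw [e1, e2]
    obtain ⟨p', hA⟩ := A_fold n n.toNat 0 (by omega) 0
      ((PySem.List.pyRange 1 (n+1) 1).map (fun i => List.replicate i.toNat (0:Int)), -1, 0, 1)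
    obtain ⟨dv, l, s, hB⟩ := bRun_phases n.toNat 0
      ((PySem.List.pyRange 1 (n+1) 1).map (fun i => List.replicate i.toNat (0:Int)), -1, 0, 1)
    rw [hA, hB]
    simp [embA, emb]
  · have h1 : PySem.List.pyRange 1 (n+1) 1 = [] := PySem.List.pyRange_one_eq_nil (by omega)
    have h2 : PySem.List.pyRange 0 n 1 = [] := PySem.List.pyRange_one_eq_nil (by omega)
    rw [h1, h2, if_neg (by omega : ¬ (0:Int) < n)]
    rfl
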